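-- pv_equiv track=rewrite | github.com/RafayelSusanyan/ProteinContactMap | utils/nolongerused/get_adj_distances.py | get_alignment_indices
-- ===== SOURCE A (Python) =====
-- def get_alignment_indices(aligned_target_seq, aligned_similar_seq):
--     target_indices = []
--     similar_indices = []
--     idx_target = 0
--     idx_similar = 0
--     for res_target, res_similar in zip(aligned_target_seq, aligned_similar_seq):
--         if res_target != '-' and res_similar != '-':
--             target_indices.append(idx_target)
--             similar_indices.append(idx_similar)
--         if res_target != '-':
--             idx_target += 1
--         if res_similar != '-':
--             idx_similar += 1
--     return target_indices, similar_indices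
-- ===== SOURCE B (Python) =====
-- def get_alignment_indices(aligned_target_seq, aligned_similar_seq):
--     def index_table(seq):
--         table = []
--         idx = 0
--         for res in seq:
--             if res == '-':
--                 table.append(None)
--             else:
--                 table.append(idx)
--                 idx += 1
--         return table
--     target_table = index_table(aligned_target_seq)
--     similar_table = index_table(aligned_similar_seq)
--     target_indices = []
--     similar_indices = []
--     for i, j in zip(target_table, similar_table):
--         if i is not None and j is not None:
--             target_indices.append(i)
--             similar_indices.append(j)
--     return target_indices, similar_indices
-- ===== Notes on version B (the rewrite author's own statement) =====
-- stated objective: alternative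
-- what changed: B first precomputes, per sequence, a per-column table of running ungapped indices (None on gaps) and then zips the two tables to collect the matched index pairs, instead of A's single interleaved loop maintaining two counters and conditional appends.
import Mathlib
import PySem

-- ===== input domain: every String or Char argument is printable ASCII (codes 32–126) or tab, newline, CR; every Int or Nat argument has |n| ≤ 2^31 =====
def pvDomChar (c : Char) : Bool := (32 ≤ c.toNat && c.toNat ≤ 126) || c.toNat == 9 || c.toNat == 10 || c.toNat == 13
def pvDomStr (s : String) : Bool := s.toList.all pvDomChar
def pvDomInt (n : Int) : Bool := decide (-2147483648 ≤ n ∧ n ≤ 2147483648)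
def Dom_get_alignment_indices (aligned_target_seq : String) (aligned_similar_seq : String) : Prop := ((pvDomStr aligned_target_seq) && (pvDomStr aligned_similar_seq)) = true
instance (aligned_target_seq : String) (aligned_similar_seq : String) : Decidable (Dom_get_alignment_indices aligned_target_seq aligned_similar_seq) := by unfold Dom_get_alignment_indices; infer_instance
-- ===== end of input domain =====

-- B replaces A's single interleaved counting loop by two precomputed per-column
-- index tables (Option Int, none on gaps) that are then zipped (objective: alternative).

-- ===== PORT A =====
-- one loop over zip of the two strings, two running counters, conditional appends
def get_alignment_indices (aligned_target_seq : String) (aligned_similar_seq : String) : List Int × List Int :=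
  let st :=
    (aligned_target_seq.toList.zip aligned_similar_seq.toList).foldl
      (fun (acc : List Int × List Int × Int × Int) (p : Char × Char) =>
        let (ti, si, idxt, idxs) := acc
        let (ti, si) :=
          if p.1 ≠ '-' ∧ p.2 ≠ '-' then (ti ++ [idxt], si ++ [idxs]) else (ti, si)
        let idxt := if p.1 ≠ '-' then idxt + 1 else idxt
        let idxs := if p.2 ≠ '-' then idxs + 1 else idxs
        (ti, si, idxt, idxs))
      ([], [], 0, 0)
  (st.1, st.2.1)

-- ===== PORT B =====
-- per-column table: running ungapped index, or none on a gap
def pvIndexTable (cs : List Char) : List (Option Int) :=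
  (cs.foldl
    (fun (acc : List (Option Int) × Int) (c : Char) =>
      if c = '-' then (acc.1 ++ [none], acc.2)
      else (acc.1 ++ [some acc.2], acc.2 + 1))
    ([], 0)).1

def get_alignment_indices_alt (aligned_target_seq : String) (aligned_similar_seq : String) : List Int × List Int :=
  let tt := pvIndexTable aligned_target_seq.toList
  let st := pvIndexTable aligned_similar_seq.toList
  (tt.zip st).foldl
    (fun (acc : List Int × List Int) (p : Option Int × Option Int) =>
      match p with
      | (some i, some j) => (acc.1 ++ [i], acc.2 ++ [j])
      | _ => acc)
    ([], [])

-- ===== PRECONDITION & SPEC =====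
def Spec_get_alignment_indices (aligned_target_seq : String) (aligned_similar_seq : String) (out : List Int × List Int) : Prop := out = get_alignment_indices_alt aligned_target_seq aligned_similar_seq
instance (aligned_target_seq : String) (aligned_similar_seq : String) (out : List Int × List Int) : Decidable (Spec_get_alignment_indices aligned_target_seq aligned_similar_seq out) := by unfold Spec_get_alignment_indices; infer_instance

-- ===== CLAIM (what is proved, stated in full; the proofs are below) =====
def Claim_equal_get_alignment_indices : Prop := ∀ (aligned_target_seq : String) (aligned_similar_seq : String), Dom_get_alignment_indices aligned_target_seq aligned_similar_seq → Spec_get_alignment_indices aligned_target_seq aligned_similar_seq (get_alignment_indices aligned_target_seq aligned_similar_seq)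

-- ===== LEMMAS AND PROOFS =====

-- common recursive specification: the matched index pairs starting from counters it, is
def pvGo (ts ss : List Char) (it isim : Int) : List Int × List Int :=
  match ts, ss with
  | a :: ts', b :: ss' =>
      let rest := pvGo ts' ss' (if a = '-' then it else it + 1) (if b = '-' then isim else isim + 1)
      if a ≠ '-' ∧ b ≠ '-' then (it :: rest.1, isim :: rest.2) else rest
  | _, _ => ([], [])

-- A's fold, with its accumulator generalized, computes pvGo (stated per projection)
theorem pvA_fold (ts ss : List Char) (ti si : List Int) (it isim : Int) :
    ((ts.zip ss).foldl
      (fun (acc : List Int × List Int × Int × Int) (p : Char × Char) =>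
        let (ti, si, idxt, idxs) := acc
        let (ti, si) :=
          if p.1 ≠ '-' ∧ p.2 ≠ '-' then (ti ++ [idxt], si ++ [idxs]) else (ti, si)
        let idxt := if p.1 ≠ '-' then idxt + 1 else idxt
        let idxs := if p.2 ≠ '-' then idxs + 1 else idxs
        (ti, si, idxt, idxs))
      (ti, si, it, isim)).1 = ti ++ (pvGo ts ss it isim).1 ∧
    ((ts.zip ss).foldl
      (fun (acc : List Int × List Int × Int × Int) (p : Char × Char) =>
        let (ti, si, idxt, idxs) := acc
        let (ti, si) :=
          if p.1 ≠ '-' ∧ p.2 ≠ '-' then (ti ++ [idxt], si ++ [idxs]) else (ti, si)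
        let idxt := if p.1 ≠ '-' then idxt + 1 else idxt
        let idxs := if p.2 ≠ '-' then idxs + 1 else idxs
        (ti, si, idxt, idxs))
      (ti, si, it, isim)).2.1 = si ++ (pvGo ts ss it isim).2 := by
  induction ts generalizing ss ti si it isim with
  | nil => cases ss <;> simp [pvGo]
  | cons a ts' ih =>
    cases ss with
    | nil => simp [pvGo]
    | cons b ss' =>
      by_cases ha : a = '-' <;> by_cases hb : b = '-'
      · simpa [pvGo, ha, hb] using ih ss' ti si it isim
      · simpa [pvGo, ha, hb] using ih ss' ti si it (isim + 1)
      · simpa [pvGo, ha, hb] using ih ss' ti si (it + 1) isim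
      · simpa [pvGo, ha, hb, List.append_assoc] using
          ih ss' (ti ++ [it]) (si ++ [isim]) (it + 1) (isim + 1)

-- the index-table fold, accumulator generalized, prepends its table
theorem pvIndexTable_fold (cs : List Char) (acc : List (Option Int)) (n : Int) :
    (cs.foldl
      (fun (acc : List (Option Int) × Int) (c : Char) =>
        if c = '-' then (acc.1 ++ [none], acc.2)
        else (acc.1 ++ [some acc.2], acc.2 + 1))
      (acc, n)).1 = acc ++ (cs.foldl
      (fun (acc : List (Option Int) × Int) (c : Char) =>
        if c = '-' then (acc.1 ++ [none], acc.2)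
        else (acc.1 ++ [some acc.2], acc.2 + 1))
      ([], n)).1 := by
  induction cs generalizing acc n with
  | nil => simp
  | cons c cs' ih =>
    by_cases hc : c = '-' <;>
      simp only [List.foldl_cons, hc, if_pos, ite_false] <;>
      rw [ih, ih ([] ++ _)] <;> simp [List.append_assoc]

-- recursive characterization of pvIndexTable started at counter n
def pvTab (cs : List Char) (n : Int) : List (Option Int) :=
  match cs with
  | [] => []
  | c :: cs' => if c = '-' then none :: pvTab cs' n else some n :: pvTab cs' (n + 1)

theorem pvTab_eq (cs : List Char) (n : Int) :
    (cs.foldl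
      (fun (acc : List (Option Int) × Int) (c : Char) =>
        if c = '-' then (acc.1 ++ [none], acc.2)
        else (acc.1 ++ [some acc.2], acc.2 + 1))
      ([], n)).1 = pvTab cs n := by
  induction cs generalizing n with
  | nil => simp [pvTab]
  | cons c cs' ih =>
    by_cases hc : c = '-' <;>
      simp only [List.foldl_cons, hc, ite_true, ite_false, pvTab] <;>
      rw [pvIndexTable_fold] <;> simp [ih]

-- B's pair-collecting fold over the zipped tables, accumulator generalized, computes pvGo
theorem pvB_fold (ts ss : List Char) (x y : List Int) (it isim : Int) :
    ((pvTab ts it).zip (pvTab ss isim)).foldl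
      (fun (acc : List Int × List Int) (p : Option Int × Option Int) =>
        match p with
        | (some i, some j) => (acc.1 ++ [i], acc.2 ++ [j])
        | _ => acc)
      (x, y) = (x ++ (pvGo ts ss it isim).1, y ++ (pvGo ts ss it isim).2) := by
  induction ts generalizing ss x y it isim with
  | nil => cases ss <;> simp [pvTab, pvGo]
  | cons a ts' ih =>
    cases ss with
    | nil => simp [pvTab, pvGo]
    | cons b ss' =>
      by_cases ha : a = '-' <;> by_cases hb : b = '-' <;>
        simp [pvTab, pvGo, ha, hb, ih, List.append_assoc]

-- ===== VERDICT (by name: the statement is the Claim_ definition above) =====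
theorem get_alignment_indices_spec : Claim_equal_get_alignment_indices := by
  intro t s _
  unfold Spec_get_alignment_indices get_alignment_indices get_alignment_indices_alt pvIndexTable
  rw [pvTab_eq, pvTab_eq, pvB_fold]
  obtain ⟨h1, h2⟩ := pvA_fold t.toList s.toList [] [] 0 0
  simp only [List.nil_append] at h1 h2
  exact Prod.ext h1 h2
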